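-- pv_equiv track=rewrite | github.com/KiarieJefff/Ds-Data-Cleaning-Toolkit | data_cleaner.py | clean_list
-- ===== SOURCE A (Python) =====
-- from typing import Union, List, Dict, Any, Optional
--
-- def clean_list(data_list: List[Any],
--               remove_duplicates: bool = True,
--               remove_empty: bool = True,
--               remove_none: bool = True,
--               sort: bool = False,
--               unique_only: bool = True) -> List[Any]:
--     """
--     Clean list data
--
--     Args:
--         data_list: Input list
--         remove_duplicates: Remove duplicate items
--         remove_empty: Remove empty strings
--         remove_none: Remove None values
--         sort: Sort the list
--         unique_only: Keep only unique values (if remove_duplicates=False)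
--
--     Returns:
--         Cleaned list
--     """
--     if not isinstance(data_list, list):
--         return []
--
--     cleaned = data_list.copy()
--
--     if remove_empty:
--         cleaned = [x for x in cleaned if str(x).strip() != '']
--
--     if remove_none:
--         cleaned = [x for x in cleaned if x is not None]
--
--     # Strip whitespace from remaining items if they're strings
--     cleaned = [x.strip() if isinstance(x, str) else x for x in cleaned]
--
--     if remove_duplicates or unique_only:
--         # Preserve order while removing duplicates
--         seen = set()
--         cleaned = [x for x in cleaned if not (x in seen or seen.add(x))]
--
--     if sort:
--         try:
--             cleaned.sort()
--         except TypeError: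
--             # Handle mixed types by converting to string for sorting
--             cleaned.sort(key=str)
--
--     return cleaned
-- ===== SOURCE B (Python) =====
-- def clean_list(data_list,
--                remove_duplicates=True,
--                remove_empty=True,
--                remove_none=True,
--                sort=False,
--                unique_only=True):
--     """Re-implementation by occurrence counting: first collect the surviving
--     stripped values, then dedupe (if asked) with a multiplicity table and a
--     reverse walk -- an element is kept exactly when, after decrementing, no
--     copy of it remains earlier in the list -- instead of a seen-set scan."""
--     if not isinstance(data_list, list):
--         return []
--
--     keys = []
--     for x in data_list:
--         if remove_empty and str(x).strip() == '':
--             continue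
--         if remove_none and x is None:
--             continue
--         keys.append(x.strip() if isinstance(x, str) else x)
--
--     if remove_duplicates or unique_only:
--         remaining = {}
--         for v in keys:
--             remaining[v] = remaining.get(v, 0) + 1
--         cleaned = []
--         for v in reversed(keys):
--             remaining[v] -= 1
--             if remaining[v] == 0:  # no earlier copy left: first occurrence
--                 cleaned.append(v)
--         cleaned.reverse()
--     else:
--         cleaned = keys
--
--     if sort:
--         try:
--             cleaned.sort()
--         except TypeError:
--             cleaned.sort(key=str)
--     return cleaned
-- ===== Notes on version B (the rewrite author's own statement) =====
-- stated objective: alternative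
-- what changed: Replaces A's staged comprehensions with a seen-set dedup by a count-based algorithm: collect the surviving stripped values in one loop, build a multiplicity table, then a reverse walk keeps a value exactly when no earlier copy of it remains, so there is no seen set and no membership-driven comprehension.
-- outside the precondition, e.g. on clean_list([None], True, True, False, False, True): A returns [None], B returns [None]
import Mathlib
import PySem

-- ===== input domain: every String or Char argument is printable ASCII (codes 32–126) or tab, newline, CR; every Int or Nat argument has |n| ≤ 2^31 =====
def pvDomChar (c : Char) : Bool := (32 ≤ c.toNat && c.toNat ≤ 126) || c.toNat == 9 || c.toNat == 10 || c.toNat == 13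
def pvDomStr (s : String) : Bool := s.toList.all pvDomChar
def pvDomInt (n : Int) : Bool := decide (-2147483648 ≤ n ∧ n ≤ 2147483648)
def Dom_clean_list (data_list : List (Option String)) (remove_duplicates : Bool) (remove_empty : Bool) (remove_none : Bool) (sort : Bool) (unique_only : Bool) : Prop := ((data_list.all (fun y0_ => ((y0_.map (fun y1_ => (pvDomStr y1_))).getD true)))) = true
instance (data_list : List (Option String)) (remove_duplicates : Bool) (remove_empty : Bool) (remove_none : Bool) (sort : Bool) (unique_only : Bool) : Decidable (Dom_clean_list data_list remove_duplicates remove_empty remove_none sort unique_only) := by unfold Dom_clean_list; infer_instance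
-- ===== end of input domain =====

-- B collects the surviving stripped values once and dedups by occurrence counting (a multiplicity table plus a reverse walk keeping a value when no earlier copy remains) instead of A's staged passes with a seen-set; equal return value on Pre_.

-- ===== PORT A =====
-- str(x) for x : Option String — "None" for None, the string itself otherwise
def pvStrOf (x : Option String) : String := match x with | none => "None" | some s => s

def clean_list (data_list : List (Option String)) (remove_duplicates : Bool) (remove_empty : Bool) (remove_none : Bool) (sort : Bool) (unique_only : Bool) : List String :=
  -- (the non-list guard of A is unreachable under the typed signature)
  let cleaned := data_list
  let cleaned := if remove_empty then cleaned.filter (fun x => !(PySem.Str.strip (pvStrOf x) == "")) else cleaned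
  let cleaned := if remove_none then cleaned.filter (fun x => x.isSome) else cleaned
  let cleaned := cleaned.map (fun x => x.map PySem.Str.strip)  -- strip the strings, None unchanged
  let cleaned := if remove_duplicates || unique_only then PySem.List.dedup cleaned else cleaned
  -- the return type is List String: drop None entries (none present under Pre_clean_list)
  let out := cleaned.filterMap id
  -- under Pre_ all elements are strings, so cleaned.sort() succeeds (the TypeError fallback is unreachable)
  if sort then PySem.List.sorted out (fun s => s) false else out

-- ===== PORT B =====
-- Source B phase 1: the surviving stripped values, in order
def pvKeysB (re rn : Bool) : List (Option String) → List String
  | [] => []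
  | x :: t =>
    if re && (PySem.Str.strip (pvStrOf x) == "") then pvKeysB re rn t
    else if rn && x.isNone then pvKeysB re rn t
    else
      match x with
      | none => pvKeysB re rn t  -- a kept None leaves the String type: outside Pre_clean_list
      | some s => PySem.Str.strip s :: pvKeysB re rn t

-- Source B: remaining[v] = remaining.get(v, 0) + 1 over keys
def pvCountD (keys : List String) : PySem.Dict String Int :=
  keys.foldl (fun d v => d.insert v (d.getD v 0 + 1)) PySem.Dict.empty

-- Source B: for v in reversed(keys): remaining[v] -= 1; if remaining[v] == 0: cleaned.append(v)
def pvScan : List String → PySem.Dict String Int → List String → List String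
  | [], _, acc => acc
  | v :: t, rem, acc =>
    let c := rem.getD v 0 - 1
    let rem' := rem.insert v c
    if c == 0 then pvScan t rem' (acc ++ [v]) else pvScan t rem' acc

def clean_list_alt (data_list : List (Option String)) (remove_duplicates : Bool) (remove_empty : Bool) (remove_none : Bool) (sort : Bool) (unique_only : Bool) : List String :=
  let keys := pvKeysB remove_empty remove_none data_list
  let cleaned :=
    if remove_duplicates || unique_only then
      (pvScan keys.reverse (pvCountD keys) []).reverse  -- cleaned.reverse()
    else keys
  if sort then PySem.List.sorted cleaned (fun s => s) false else cleaned

-- ===== PRECONDITION & SPEC =====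
-- Pre_ excludes only the inputs whose surviving elements include a None (a None in the list with
-- remove_none=False): there A's return value contains None, which is not a value of the declared
-- Lean return type List String (the Python B returns the identical None-containing list there).
def Pre_clean_list (data_list : List (Option String)) (remove_duplicates : Bool) (remove_empty : Bool) (remove_none : Bool) (sort : Bool) (unique_only : Bool) : Prop :=
  remove_none = true ∨ data_list.all (fun x => x.isSome) = true
instance (data_list : List (Option String)) (remove_duplicates : Bool) (remove_empty : Bool) (remove_none : Bool) (sort : Bool) (unique_only : Bool) : Decidable (Pre_clean_list data_list remove_duplicates remove_empty remove_none sort unique_only) := by unfold Pre_clean_list; infer_instance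

def pvWitness_clean_list : List (Option String) × Bool × Bool × Bool × Bool × Bool :=
  ([some " a ", none, some "a", some "  ", some "b"], true, true, true, true, true)

def Spec_clean_list (data_list : List (Option String)) (remove_duplicates : Bool) (remove_empty : Bool) (remove_none : Bool) (sort : Bool) (unique_only : Bool) (out : List String) : Prop := out = clean_list_alt data_list remove_duplicates remove_empty remove_none sort unique_only
instance (data_list : List (Option String)) (remove_duplicates : Bool) (remove_empty : Bool) (remove_none : Bool) (sort : Bool) (unique_only : Bool) (out : List String) : Decidable (Spec_clean_list data_list remove_duplicates remove_empty remove_none sort unique_only out) := by unfold Spec_clean_list; infer_instance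

-- ===== CLAIM (what is proved, stated in full; the proofs are below) =====
def Claim_equal_clean_list : Prop := ∀ (data_list : List (Option String)) (remove_duplicates : Bool) (remove_empty : Bool) (remove_none : Bool) (sort : Bool) (unique_only : Bool), Dom_clean_list data_list remove_duplicates remove_empty remove_none sort unique_only → Pre_clean_list data_list remove_duplicates remove_empty remove_none sort unique_only → Spec_clean_list data_list remove_duplicates remove_empty remove_none sort unique_only (clean_list data_list remove_duplicates remove_empty remove_none sort unique_only)

-- ===== LEMMAS AND PROOFS =====

-- the list of stripped strings that survive the filters (proof-only helper)
def pvKeyList (remove_empty : Bool) : List (Option String) → List String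
  | [] => []
  | none :: t => pvKeyList remove_empty t
  | some s :: t =>
    if remove_empty && (PySem.Str.strip s == "") then pvKeyList remove_empty t
    else PySem.Str.strip s :: pvKeyList remove_empty t

-- seen-set ordered dedup as A performs it (proof-only helper)
def pvDedupGo : List String → PySem.Set String → List String
  | [], _ => []
  | x :: t, seen =>
    if PySem.Set.contains seen x then pvDedupGo t seen
    else x :: pvDedupGo t (PySem.Set.add seen x)

-- classic nub: first occurrences, by deleting later duplicates (proof-only helper)
def pvNub : List String → List String
  | [] => []
  | x :: t => x :: (pvNub t).filter (fun u => !(u == x))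

lemma pv_strip_None : (PySem.Str.strip (pvStrOf none) == "") = false := by decide

lemma pv_contains_map_some (s : List String) (x : String) :
    PySem.Set.contains (s.map some) (some x) = PySem.Set.contains s x := by
  by_cases h : x ∈ s <;> simp [PySem.Set.contains, h]

lemma pv_add_map_some (s : List String) (x : String) :
    PySem.Set.add (s.map some) (some x) = (PySem.Set.add s x).map some := by
  simp only [PySem.Set.add, pv_contains_map_some]
  split <;> simp

lemma pv_foldl_add_map_some : ∀ (K s : List String),
    (K.map some).foldl PySem.Set.add (s.map some) = (K.foldl PySem.Set.add s).map some
  | [], s => rfl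
  | x :: t, s => by
    simp only [List.map_cons, List.foldl_cons, pv_add_map_some]
    exact pv_foldl_add_map_some t _

lemma pv_dedup_map_some (K : List String) :
    PySem.List.dedup (K.map some) = (PySem.List.dedup K).map some := by
  simpa [PySem.List.dedup, PySem.Set.ofList, PySem.Set.empty] using pv_foldl_add_map_some K []

lemma pv_foldl_add_eq_dedupGo : ∀ (K : List String) (seen : PySem.Set String),
    K.foldl PySem.Set.add seen = seen ++ pvDedupGo K seen
  | [], seen => by simp [pvDedupGo]
  | x :: t, seen => by
    by_cases h : x ∈ seen
    · simp [pvDedupGo, PySem.Set.contains, PySem.Set.add, h, pv_foldl_add_eq_dedupGo t seen]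
    · simp [pvDedupGo, PySem.Set.contains, PySem.Set.add, h, pv_foldl_add_eq_dedupGo t (seen ++ [x])]

-- the seen-set dedup is the nub: invariant over the carried set
lemma pv_dedupGo_eq_nub_filter : ∀ (K : List String) (seen : PySem.Set String),
    pvDedupGo K seen = (pvNub K).filter (fun y => !(PySem.Set.contains seen y))
  | [], _ => by simp [pvDedupGo, pvNub]
  | x :: t, seen => by
    by_cases h : x ∈ seen
    · have hx : PySem.Set.contains seen x = true := by simp [PySem.Set.contains, h]
      simp only [pvDedupGo, hx, if_true, pvNub, List.filter_cons, Bool.not_true,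
        List.filter_filter, pv_dedupGo_eq_nub_filter t seen]
      refine List.filter_congr ?_
      intro y _
      by_cases hy : y = x
      · subst hy; simp [h]
      · simp [hy]
    · have hx : PySem.Set.contains seen x = false := by simp [PySem.Set.contains, h]
      have hadd : PySem.Set.add seen x = seen ++ [x] := by
        simp [PySem.Set.add, PySem.Set.contains, h]
      have ih := pv_dedupGo_eq_nub_filter t (seen ++ [x])
      simp only [pvDedupGo, hx, if_false, hadd, ih, pvNub, List.filter_cons, Bool.not_false,
        List.filter_filter]
      refine congrArg (x :: ·) (List.filter_congr ?_)
      intro y _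
      by_cases hy : y = x
      · subst hy; simp [PySem.Set.contains]
      · by_cases hys : y ∈ seen <;> simp [PySem.Set.contains, hy, hys]

lemma pv_dedup_eq_nub (K : List String) :
    PySem.List.dedup K = pvNub K := by
  have h := pv_foldl_add_eq_dedupGo K []
  have h2 := pv_dedupGo_eq_nub_filter K []
  simp [PySem.List.dedup, PySem.Set.ofList, PySem.Set.empty, h, h2, PySem.Set.contains]

-- phase 1 produces exactly the survivors
lemma pv_keysB_eq (re rn : Bool) : ∀ (xs : List (Option String)),
    (rn = true ∨ xs.all (fun x => x.isSome) = true) →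
    pvKeysB re rn xs = pvKeyList re xs
  | [], _ => by simp [pvKeysB, pvKeyList]
  | none :: t, h => by
    have hrn : rn = true := by
      rcases h with h | h
      · exact h
      · simp at h
    subst hrn
    have ih := pv_keysB_eq re true t (Or.inl rfl)
    simp [pvKeysB, pvKeyList, pv_strip_None, ih]
  | some s :: t, h => by
    have ht : rn = true ∨ t.all (fun x => x.isSome) = true := by
      rcases h with h | h
      · exact Or.inl h
      · simp at h; exact Or.inr (by simpa using h)
    have ih := pv_keysB_eq re rn t ht
    by_cases he : re && (PySem.Str.strip s == "")
    · simp [pvKeysB, pvKeyList, pvStrOf, he, ih]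
    · simp [pvKeysB, pvKeyList, pvStrOf, he, ih]

-- the counting fold is the multiplicity table
lemma pv_countD_getD_aux : ∀ (K : List String) (d : PySem.Dict String Int) (u : String),
    (K.foldl (fun d v => d.insert v (d.getD v 0 + 1)) d).getD u 0 = d.getD u 0 + (K.count u : Int)
  | [], d, u => by simp
  | v :: t, d, u => by
    simp only [List.foldl_cons, pv_countD_getD_aux t _ u, PySem.Dict.getD_insert, List.count_cons]
    by_cases hu : u = v
    · subst hu; simp; ring
    · have : (v == u) = false := by simp [Ne.symm hu]
      simp [hu, this]

lemma pv_countD_getD (K : List String) (u : String) :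
    (pvCountD K).getD u 0 = (K.count u : Int) := by
  simpa [pvCountD] using pv_countD_getD_aux K PySem.Dict.empty u

-- appending one element to the nub
lemma pv_nub_append (v : String) : ∀ (K : List String),
    pvNub (K ++ [v]) = pvNub K ++ (if v ∈ K then [] else [v])
  | [] => by simp [pvNub]
  | x :: t => by
    simp only [List.cons_append, pvNub, pv_nub_append v t, List.filter_append]
    by_cases hvx : v = x
    · subst hvx
      by_cases hvt : v ∈ t <;> simp [hvt, List.filter]
    · by_cases hvt : v ∈ t <;> simp [hvt, hvx, List.filter, Ne.symm hvx]

-- the reverse walk keeps exactly the first occurrences (in reverse order)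
lemma pv_scan_spec (K : List String) : ∀ (rem : PySem.Dict String Int) (acc : List String),
    (∀ u, rem.getD u 0 = (K.count u : Int)) →
    pvScan K.reverse rem acc = acc ++ (pvNub K).reverse := by
  induction K using List.reverseRecOn with
  | nil => intro rem acc _; simp [pvScan, pvNub]
  | append_singleton K' v ih =>
    intro rem acc hrem
    have hcv : rem.getD v 0 = (K'.count v : Int) + 1 := by
      simpa using hrem v
    have hrem' : ∀ u, (rem.insert v (rem.getD v 0 - 1)).getD u 0 = (K'.count u : Int) := by
      intro u
      rw [PySem.Dict.getD_insert]
      by_cases hu : u = v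
      · subst hu; rw [hcv]; simp
      · have h2 := hrem u
        have hc0 : List.count u [v] = 0 := List.count_eq_zero.mpr (by simp [hu])
        simp [hu, h2, List.count_append, hc0]
    by_cases hv : v ∈ K'
    · have hne : ((rem.getD v 0 - 1 : Int) == 0) = false := by
        have : 0 < K'.count v := List.count_pos_iff.mpr hv
        rw [hcv]; simp; omega
      simp only [List.reverse_append, List.reverse_singleton, List.singleton_append, pvScan, hne,
        ih _ acc hrem', pv_nub_append v K', hv, if_true, List.append_nil]
      simp
    · have heq : ((rem.getD v 0 - 1 : Int) == 0) = true := by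
        have : K'.count v = 0 := by simpa [List.count_eq_zero] using hv
        rw [hcv, this]; simp
      simp only [List.reverse_append, List.reverse_singleton, List.singleton_append, pvScan, heq,
        if_true, ih _ (acc ++ [v]) hrem', pv_nub_append v K', hv, if_false]
      simp

-- A's staged passes produce the survivors (tagged with some)
lemma pv_pipeA (re rn : Bool) : ∀ (xs : List (Option String)),
    (rn = true ∨ xs.all (fun x => x.isSome) = true) →
    ((if rn then (if re then xs.filter (fun x => !(PySem.Str.strip (pvStrOf x) == "")) else xs).filter (fun x => x.isSome) else (if re then xs.filter (fun x => !(PySem.Str.strip (pvStrOf x) == "")) else xs)).map (fun x => x.map PySem.Str.strip)) = (pvKeyList re xs).map some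
  | [], _ => by cases re <;> cases rn <;> simp [pvKeyList]
  | none :: t, h => by
    have hrn : rn = true := by
      rcases h with h | h
      · exact h
      · simp at h
    have ih := pv_pipeA re rn t (Or.inl hrn)
    subst hrn
    cases re <;> simp_all [pvKeyList, pv_strip_None]
  | some s :: t, h => by
    have ht : rn = true ∨ t.all (fun x => x.isSome) = true := by
      rcases h with h | h
      · exact Or.inl h
      · simp at h; exact Or.inr (by simpa using h)
    have ih := pv_pipeA re rn t ht
    by_cases he : (PySem.Str.strip s == "")
    · cases re <;> cases rn <;> simp_all [pvKeyList, pvStrOf]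
    · cases re <;> cases rn <;> simp_all [pvKeyList, pvStrOf]

-- ===== VERDICT (by name: the statement is the Claim_ definition above) =====
theorem clean_list_spec : Claim_equal_clean_list := by
  intro dl rd re rn so uo _hDom hPre
  unfold Spec_clean_list clean_list clean_list_alt
  have hP : rn = true ∨ dl.all (fun x => x.isSome) = true := hPre
  have hpipe := pv_pipeA re rn dl hP
  have hkeys : pvKeysB re rn dl = pvKeyList re dl := pv_keysB_eq re rn dl hP
  cases hdd : (rd || uo) with
  | true =>
    have hscan := pv_scan_spec (pvKeyList re dl) (pvCountD (pvKeyList re dl)) []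
      (fun u => pv_countD_getD (pvKeyList re dl) u)
    simp only [hpipe, hdd, if_true, hkeys, hscan, List.nil_append, List.reverse_reverse,
      pv_dedup_map_some, pv_dedup_eq_nub]
    simp [List.filterMap_map]
  | false =>
    simp only [hpipe, hdd, hkeys]
    simp [List.filterMap_map]
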